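-- pv_equiv track=rewrite | github.com/JuiceLee-0404/IDR-LLPS-gold-database | src/export/compute_nardini90_features.py | cumulative_patch_length
-- ===== SOURCE A (Python) =====
-- def cumulative_patch_length(seq: str, aa: str, min_len: int = 2) -> int:
--     total = 0
--     run = 0
--     for ch in seq:
--         if ch == aa:
--             run += 1
--         else:
--             if run >= min_len:
--                 total += run
--             run = 0
--     if run >= min_len:
--         total += run
--     return total
-- ===== SOURCE B (Python) =====
-- def cumulative_patch_length(seq: str, aa: str, min_len: int = 2) -> int:
--     # Boundary method: find the start and end indices of every maximal run of
--     # aa with two index scans, pair them up, and sum the boundary differences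
--     # that meet the threshold.
--     n = len(seq)
--     starts = [i for i in range(n) if seq[i] == aa and (i == 0 or seq[i-1] != aa)]
--     ends = [i + 1 for i in range(n) if seq[i] == aa and (i + 1 == n or seq[i+1] != aa)]
--     return sum(e - s for s, e in zip(starts, ends) if e - s >= min_len)
-- ===== Notes on version B (the rewrite author's own statement) =====
-- stated objective: alternative
-- what changed: Replaces the running-counter state machine by a boundary method: two index scans collect the start and end positions of maximal runs of aa, zip pairs them, and the summed boundary differences that meet the threshold give the total.
import Mathlib
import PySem

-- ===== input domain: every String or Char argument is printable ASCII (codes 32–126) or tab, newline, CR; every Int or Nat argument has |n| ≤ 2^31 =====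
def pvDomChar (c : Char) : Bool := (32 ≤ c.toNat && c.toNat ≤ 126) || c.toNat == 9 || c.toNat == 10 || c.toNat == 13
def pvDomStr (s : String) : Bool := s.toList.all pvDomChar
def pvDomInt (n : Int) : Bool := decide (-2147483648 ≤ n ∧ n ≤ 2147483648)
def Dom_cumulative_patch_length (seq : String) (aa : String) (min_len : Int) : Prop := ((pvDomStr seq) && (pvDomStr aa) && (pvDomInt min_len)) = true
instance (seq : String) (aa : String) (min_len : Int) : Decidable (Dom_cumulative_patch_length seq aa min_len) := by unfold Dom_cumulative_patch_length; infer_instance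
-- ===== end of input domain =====

-- B replaces A's running-counter state machine by a boundary method: two index
-- scans collect run starts and ends, zip pairs them, and qualifying boundary
-- differences are summed (alternative decomposition; same cost).


-- ===== PORT A =====
-- loop body: 'if ch == aa: run += 1 else: flush'; state = (total, run)
def pvStepA (aa : String) (min_len : Int) (st : Int × Int) (c : Char) : Int × Int :=
  if [c] = aa.toList then (st.1, st.2 + 1)
  else (if min_len ≤ st.2 then st.1 + st.2 else st.1, 0)

def cumulative_patch_length (seq : String) (aa : String) (min_len : Int) : Int :=
  let st := seq.toList.foldl (pvStepA aa min_len) (0, 0)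
  if min_len ≤ st.2 then st.1 + st.2 else st.1

-- ===== PORT B =====
-- 'seq[i] == aa' for a character index i (1-char string equals aa)
def pvMatch (l : List Char) (aa : String) (i : Nat) : Bool :=
  decide ([l.getD i ' '] = aa.toList)

-- '[i for i in range(n) if seq[i] == aa and (i == 0 or seq[i-1] != aa)]'
def pvStarts (l : List Char) (aa : String) : List Nat :=
  (List.range l.length).filter (fun i => pvMatch l aa i && (i == 0 || !pvMatch l aa (i-1)))

-- '[i + 1 for i in range(n) if seq[i] == aa and (i + 1 == n or seq[i+1] != aa)]'
def pvEnds (l : List Char) (aa : String) : List Nat :=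
  ((List.range l.length).filter
      (fun i => pvMatch l aa i && (i + 1 == l.length || !pvMatch l aa (i+1)))).map (· + 1)

def cumulative_patch_length_alt (seq : String) (aa : String) (min_len : Int) : Int :=
  let l := seq.toList
  ((((pvStarts l aa).zip (pvEnds l aa)).map
      (fun p => ((p.2 : Int) - (p.1 : Int)))).filter (fun d => decide (min_len ≤ d))).sum

-- ===== PRECONDITION & SPEC =====
def Spec_cumulative_patch_length (seq : String) (aa : String) (min_len : Int) (out : Int) : Prop := out = cumulative_patch_length_alt seq aa min_len
instance (seq : String) (aa : String) (min_len : Int) (out : Int) : Decidable (Spec_cumulative_patch_length seq aa min_len out) := by unfold Spec_cumulative_patch_length; infer_instance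

-- ===== CLAIM (what is proved, stated in full; the proofs are below) =====
def Claim_equal_cumulative_patch_length : Prop := ∀ (seq : String) (aa : String) (min_len : Int), Dom_cumulative_patch_length seq aa min_len → Spec_cumulative_patch_length seq aa min_len (cumulative_patch_length seq aa min_len)

-- ===== LEMMAS AND PROOFS =====

-- common characterization: the maximal runs of equal characters with lengths
def pvRuns : List Char → List (Char × Int)
  | [] => []
  | c :: rest =>
      (c, ((rest.takeWhile (· = c)).length : Int) + 1) :: pvRuns (rest.dropWhile (· = c))
termination_by l => l.length
decreasing_by
  simpa using Nat.lt_succ_of_le (List.length_dropWhile_le _ _)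

-- the run-sum both ports compute
def pvBSum (aa : String) (min_len : Int) (l : List Char) : Int :=
  (((pvRuns l).filter
      (fun p => decide ([p.1] = aa.toList) && decide (min_len ≤ p.2))).map Prod.snd).sum

-- B's value on a char list
def pvBVal (aa : String) (min_len : Int) (l : List Char) : Int :=
  ((((pvStarts l aa).zip (pvEnds l aa)).map
      (fun p => ((p.2 : Int) - (p.1 : Int)))).filter (fun d => decide (min_len ≤ d))).sum

-- the head of dropWhile fails the predicate
lemma dropWhile_head_false {α : Type} (p : α → Bool) :
    ∀ (l : List α) (d : α) (q' : List α), l.dropWhile p = d :: q' → p d = false := by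
  intro l
  induction l with
  | nil => intro d q' h; simp [List.dropWhile] at h
  | cons x xs ih =>
      intro d q' h
      by_cases hx : p x
      · rw [List.dropWhile_cons_of_pos hx] at h; exact ih d q' h
      · rw [List.dropWhile_cons_of_neg hx] at h
        cases h; simpa using hx

-- a non-matching character at run 0 leaves the state unchanged
lemma stepA_nomatch_zero (aa : String) (m : Int) (t : Int) (c : Char)
    (h : ¬ ([c] = aa.toList)) : pvStepA aa m (t, 0) c = (t, 0) := by
  simp [pvStepA, h]

-- folding a block of matching characters just grows the run counter
lemma fold_match (aa : String) (m : Int) (c : Char) (hc : [c] = aa.toList) :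
    ∀ (p : List Char), (∀ x ∈ p, x = c) → ∀ t r : Int,
      p.foldl (pvStepA aa m) (t, r) = (t, r + p.length) := by
  intro p
  induction p with
  | nil => intro _ t r; simp
  | cons x xs ih =>
      intro hall t r
      have hx : x = c := hall x (by simp)
      have hrest : ∀ y ∈ xs, y = c := fun y hy => hall y (by simp [hy])
      simp only [List.foldl_cons, pvStepA, hx, hc, if_pos]
      rw [ih hrest]
      simp; omega

-- folding a block of non-matching equal characters from run 0 does nothing
lemma fold_nomatch (aa : String) (m : Int) (c : Char) (hc : ¬ ([c] = aa.toList)) :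
    ∀ (p : List Char), (∀ x ∈ p, x = c) → ∀ t : Int,
      p.foldl (pvStepA aa m) (t, 0) = (t, 0) := by
  intro p
  induction p with
  | nil => intro _ t; simp
  | cons x xs ih =>
      intro hall t
      have hx : x = c := hall x (by simp)
      have hrest : ∀ y ∈ xs, y = c := fun y hy => hall y (by simp [hy])
      rw [List.foldl_cons, hx, stepA_nomatch_zero aa m t c hc]
      exact ih hrest t

-- A-side invariant: the final flush of A's fold from (t, 0) equals t plus the run-sum
lemma main_inv (aa : String) (m : Int) :
    ∀ (n : Nat) (l : List Char), l.length ≤ n → ∀ t : Int,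
      (if m ≤ (l.foldl (pvStepA aa m) (t, 0)).2
        then (l.foldl (pvStepA aa m) (t, 0)).1 + (l.foldl (pvStepA aa m) (t, 0)).2
        else (l.foldl (pvStepA aa m) (t, 0)).1) = t + pvBSum aa m l := by
  intro n
  induction n with
  | zero =>
      intro l hl t
      have hnil : l = [] := List.eq_nil_of_length_eq_zero (Nat.le_zero.mp hl)
      subst hnil
      simp [pvBSum, pvRuns]
  | succ n ih =>
      intro l hl t
      match l with
      | [] => simp [pvBSum, pvRuns]
      | c :: rest =>
          have hallp : ∀ x ∈ rest.takeWhile (· = c), x = c := by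
            intro x hx
            simpa using List.mem_takeWhile_imp hx
          have hallcp : ∀ x ∈ c :: rest.takeWhile (· = c), x = c := by
            intro x hx
            rcases List.mem_cons.mp hx with h | h
            · exact h
            · exact hallp x h
          have hql : (rest.dropWhile (· = c)).length ≤ n := by
            have h1 := List.length_dropWhile_le (fun x => decide (x = c)) rest
            simp at hl; omega
          have hruns : pvRuns (c :: rest)
              = (c, ((rest.takeWhile (· = c)).length : Int) + 1)
                  :: pvRuns (rest.dropWhile (· = c)) := by
            rw [pvRuns]
          have hdecomp : c :: rest
              = (c :: rest.takeWhile (· = c)) ++ rest.dropWhile (· = c) := by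
            simp [List.takeWhile_append_dropWhile]
          by_cases hc : [c] = aa.toList
          · -- matching run of length takeWhile + 1
            have hfold1 : (c :: rest.takeWhile (· = c)).foldl (pvStepA aa m) (t, 0)
                = (t, ((rest.takeWhile (· = c)).length : Int) + 1) := by
              have := fold_match aa m c hc (c :: rest.takeWhile (· = c)) hallcp t 0
              simpa [add_comm] using this
            have hfold : List.foldl (pvStepA aa m) (t, 0) (c :: rest)
                = List.foldl (pvStepA aa m)
                    (t, ((rest.takeWhile (· = c)).length : Int) + 1)
                    (rest.dropWhile (· = c)) := by
              rw [hdecomp, List.foldl_append, hfold1]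
            have hbsum : pvBSum aa m (c :: rest)
                = (if m ≤ ((rest.takeWhile (· = c)).length : Int) + 1
                    then ((rest.takeWhile (· = c)).length : Int) + 1 else 0)
                  + pvBSum aa m (rest.dropWhile (· = c)) := by
              by_cases hm : m ≤ ((rest.takeWhile (· = c)).length : Int) + 1
              · simp [pvBSum, hruns, hc, hm]
              · simp [pvBSum, hruns, hc, hm]
            rw [hfold, hbsum]
            cases hq2 : rest.dropWhile (· = c) with
            | nil =>
                simp only [List.foldl_nil, pvBSum, pvRuns]
                split_ifs <;> simp
            | cons d q' =>
                have hd : ¬ (d = c) := by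
                  have := dropWhile_head_false (fun x => decide (x = c)) rest d q' hq2
                  simpa using this
                have hdna : ¬ ([d] = aa.toList) := by
                  intro h
                  exact hd (by simpa using h.trans hc.symm)
                have hstep : pvStepA aa m
                    (t, ((rest.takeWhile (· = c)).length : Int) + 1) d
                    = (if m ≤ ((rest.takeWhile (· = c)).length : Int) + 1
                        then t + (((rest.takeWhile (· = c)).length : Int) + 1) else t, 0) := by
                  simp [pvStepA, hdna]
                have hih := ih (d :: q') (hq2 ▸ hql)
                    (if m ≤ ((rest.takeWhile (· = c)).length : Int) + 1
                      then t + (((rest.takeWhile (· = c)).length : Int) + 1) else t)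
                rw [List.foldl_cons,
                    stepA_nomatch_zero aa m _ d hdna] at hih
                rw [List.foldl_cons, hstep, hih]
                split_ifs <;> omega
          · -- non-matching run: skipped by both sides
            have hfold1 : (c :: rest.takeWhile (· = c)).foldl (pvStepA aa m) (t, 0)
                = (t, 0) := fold_nomatch aa m c hc (c :: rest.takeWhile (· = c)) hallcp t
            have hfold : List.foldl (pvStepA aa m) (t, 0) (c :: rest)
                = List.foldl (pvStepA aa m) (t, 0) (rest.dropWhile (· = c)) := by
              rw [hdecomp, List.foldl_append, hfold1]
            have hbsum : pvBSum aa m (c :: rest) = pvBSum aa m (rest.dropWhile (· = c)) := by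
              simp [pvBSum, hruns, hc]
            rw [hfold, hbsum]
            exact ih (rest.dropWhile (· = c)) hql t

-- getD across an append, left and right
lemma getD_append_lt {l₁ l₂ : List Char} {i : Nat} (h : i < l₁.length) (d : Char) :
    (l₁ ++ l₂).getD i d = l₁.getD i d := by
  simp [List.getD, List.getElem?_append_left h]

lemma getD_append_shift (l₁ l₂ : List Char) (j : Nat) (d : Char) :
    (l₁ ++ l₂).getD (l₁.length + j) d = l₂.getD j d := by
  simp [List.getD, List.getElem?_append_right (Nat.le_add_right _ _)]

-- every index below the block length reads c in the block
lemma block_getD (c : Char) (tw : List Char) (htw : ∀ x ∈ tw, x = c) (rest : List Char)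
    {i : Nat} (hi : i < tw.length + 1) (d : Char) :
    ((c :: tw) ++ rest).getD i d = c := by
  have h1 : i < (c :: tw).length := by simpa using hi
  rw [getD_append_lt h1]
  match i with
  | 0 => rfl
  | Nat.succ j =>
      have hj : j < tw.length := by omega
      simp [List.getD, List.getElem?_cons_succ, List.getElem?_eq_getElem hj]
      exact htw _ (List.getElem_mem hj)

-- the starts of a block decomposition
lemma starts_block (aa : String) (c : Char) (tw rest : List Char)
    (htw : ∀ x ∈ tw, x = c)
    (hrest : ∀ d q, rest = d :: q → ¬ (d = c)) :
    pvStarts ((c :: tw) ++ rest) aa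
      = (if [c] = aa.toList then [0] else [])
        ++ (pvStarts rest aa).map (fun j => (tw.length + 1) + j) := by
  have hb : ((c :: tw) ++ rest).length = (tw.length + 1) + rest.length := by
    simp; omega
  have hm : ∀ i, i < tw.length + 1 →
      pvMatch ((c :: tw) ++ rest) aa i = decide ([c] = aa.toList) := by
    intro i hi
    unfold pvMatch
    rw [block_getD c tw htw rest hi]
  have hshift : ∀ j, pvMatch ((c :: tw) ++ rest) aa (tw.length + 1 + j)
      = pvMatch rest aa j := by
    intro j
    have h := getD_append_shift (c :: tw) rest j ' '
    rw [show (c :: tw).length = tw.length + 1 from rfl] at h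
    unfold pvMatch
    rw [h]
  unfold pvStarts
  rw [hb, List.range_add, List.filter_append, List.filter_map]
  congr 1
  · -- the block contributes [0] iff c matches
    by_cases hc : [c] = aa.toList
    · rw [if_pos hc, List.range_succ_eq_map, List.filter_cons]
      have h0 : pvMatch ((c :: tw) ++ rest) aa 0 = true := by
        rw [hm 0 (by omega)]; simpa using hc
      rw [if_pos (by rw [h0]; simp)]
      have hnil : List.filter
          (fun i => pvMatch ((c :: tw) ++ rest) aa i && (i == 0 || !pvMatch ((c :: tw) ++ rest) aa (i - 1)))
          (List.map Nat.succ (List.range tw.length)) = [] := by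
        rw [List.filter_map]
        rw [List.filter_eq_nil_iff.mpr]
        · simp
        · intro i hi
          have hilt : i < tw.length := List.mem_range.mp hi
          simp only [Function.comp]
          rw [show Nat.succ i = i + 1 from rfl]
          rw [hm (i + 1) (by omega)]
          rw [show i + 1 - 1 = i from rfl, hm i (by omega)]
          simp [hc]
      rw [hnil]
    · rw [if_neg hc]
      rw [List.filter_eq_nil_iff.mpr]
      intro i hi
      have hilt : i < tw.length + 1 := List.mem_range.mp hi
      rw [hm i hilt]
      simp [hc]
  · -- the tail contributes the shifted starts of rest
    congr 1
    apply List.filter_congr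
    intro j hj
    have hjlt : j < rest.length := List.mem_range.mp hj
    simp only [Function.comp]
    rw [hshift j]
    have hne : (tw.length + 1 + j == 0) = false := by
      simp [show tw.length + 1 + j = (tw.length + j) + 1 by omega]
    rw [hne]
    match j with
    | 0 =>
        have h1 : tw.length + 1 + 0 - 1 = tw.length := by omega
        rw [h1, hm tw.length (by omega)]
        by_cases hc : [c] = aa.toList
        · obtain ⟨d, q, hrsk⟩ :=
            List.exists_cons_of_ne_nil (List.ne_nil_of_length_pos hjlt)
          have hd : ¬ (d = c) := hrest d q hrsk
          have hm0 : pvMatch rest aa 0 = false := by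
            rw [hrsk]
            unfold pvMatch
            rw [show (d :: q).getD 0 ' ' = d from rfl]
            by_cases h : [d] = aa.toList
            · exact absurd (by simpa using h.trans hc.symm) hd
            · simp [h]
          simp [hm0]
        · simp [hc]
    | Nat.succ j' =>
        have h1 : tw.length + 1 + (j' + 1) - 1 = tw.length + 1 + j' := by omega
        rw [h1, hshift j']
        simp

-- the ends of a block decomposition
lemma ends_block (aa : String) (c : Char) (tw rest : List Char)
    (htw : ∀ x ∈ tw, x = c)
    (hrest : ∀ d q, rest = d :: q → ¬ (d = c)) :
    pvEnds ((c :: tw) ++ rest) aa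
      = (if [c] = aa.toList then [tw.length + 1] else [])
        ++ (pvEnds rest aa).map (fun j => (tw.length + 1) + j) := by
  have hb : ((c :: tw) ++ rest).length = (tw.length + 1) + rest.length := by
    simp; omega
  have hm : ∀ i, i < tw.length + 1 →
      pvMatch ((c :: tw) ++ rest) aa i = decide ([c] = aa.toList) := by
    intro i hi
    unfold pvMatch
    rw [block_getD c tw htw rest hi]
  have hshift : ∀ j, pvMatch ((c :: tw) ++ rest) aa (tw.length + 1 + j)
      = pvMatch rest aa j := by
    intro j
    have h := getD_append_shift (c :: tw) rest j ' '
    rw [show (c :: tw).length = tw.length + 1 from rfl] at h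
    unfold pvMatch
    rw [h]
  have hm0 : ∀ d q, rest = d :: q → [c] = aa.toList → pvMatch rest aa 0 = false := by
    intro d q hrsk hc
    have hd : ¬ (d = c) := hrest d q hrsk
    rw [hrsk]
    unfold pvMatch
    rw [show (d :: q).getD 0 ' ' = d from rfl]
    by_cases h : [d] = aa.toList
    · exact absurd (by simpa using h.trans hc.symm) hd
    · simp [h]
  unfold pvEnds
  rw [hb, List.range_add, List.filter_append, List.filter_map, List.map_append]
  congr 1
  · -- the block contributes [tw.length + 1] iff c matches
    by_cases hc : [c] = aa.toList
    · rw [if_pos hc]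
      rw [show tw.length + 1 = (tw.length).succ from rfl, List.range_succ,
          List.filter_append]
      have hnil : List.filter
          (fun i => pvMatch ((c :: tw) ++ rest) aa i &&
            (i + 1 == tw.length + 1 + rest.length || !pvMatch ((c :: tw) ++ rest) aa (i + 1)))
          (List.range tw.length) = [] := by
        rw [List.filter_eq_nil_iff.mpr]
        intro i hi
        have hilt : i < tw.length := List.mem_range.mp hi
        rw [hm i (by omega), hm (i + 1) (by omega)]
        have hne : (i + 1 == tw.length + 1 + rest.length) = false := by
          simp; omega
        simp [hne, hc]
      rw [hnil]
      have hsh0 := hshift 0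
      rw [Nat.add_zero] at hsh0
      have hlast : (pvMatch ((c :: tw) ++ rest) aa tw.length &&
          (tw.length + 1 == tw.length + 1 + rest.length ||
            !pvMatch ((c :: tw) ++ rest) aa (tw.length + 1))) = true := by
        rw [hm tw.length (by omega)]
        by_cases hre : rest = []
        · simp [hre, hc]
        · obtain ⟨d, q, hrsk⟩ := List.exists_cons_of_ne_nil hre
          rw [hsh0, hm0 d q hrsk hc]
          simp [hc]
      simp only [List.filter_cons, List.filter_nil, List.nil_append]
      rw [hlast]
      simp
    · rw [if_neg hc]
      have hnil : List.filter
          (fun i => pvMatch ((c :: tw) ++ rest) aa i &&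
            (i + 1 == tw.length + 1 + rest.length || !pvMatch ((c :: tw) ++ rest) aa (i + 1)))
          (List.range (tw.length + 1)) = [] := by
        rw [List.filter_eq_nil_iff.mpr]
        intro i hi
        have hilt : i < tw.length + 1 := List.mem_range.mp hi
        rw [hm i hilt]
        simp [hc]
      rw [hnil]
      simp
  · -- the tail contributes the shifted ends of rest
    have hfun : ((fun i => i + 1) ∘ fun x => tw.length + 1 + x)
        = ((fun j => tw.length + 1 + j) ∘ fun i => i + 1) := by
      funext x; simp [Function.comp]; omega
    rw [List.map_map, List.map_map, hfun]
    congr 1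
    apply List.filter_congr
    intro j hj
    have hjlt : j < rest.length := List.mem_range.mp hj
    simp only [Function.comp]
    rw [hshift j]
    have h1 : tw.length + 1 + j + 1 = tw.length + 1 + (j + 1) := by omega
    rw [h1, hshift (j + 1)]
    have hbeq : (tw.length + 1 + (j + 1) == tw.length + 1 + rest.length)
        = (j + 1 == rest.length) := by
      by_cases h : j + 1 = rest.length
      · simp [h]
      · simp [h]
    rw [hbeq]

-- B-side: the boundary sum equals the run-sum
lemma bval_eq_bsum (aa : String) (m : Int) :
    ∀ (n : Nat) (l : List Char), l.length ≤ n → pvBVal aa m l = pvBSum aa m l := by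
  intro n
  induction n with
  | zero =>
      intro l hl
      have hnil : l = [] := List.eq_nil_of_length_eq_zero (Nat.le_zero.mp hl)
      subst hnil
      simp [pvBVal, pvBSum, pvRuns, pvStarts, pvEnds]
  | succ n ih =>
      intro l hl
      match l with
      | [] => simp [pvBVal, pvBSum, pvRuns, pvStarts, pvEnds]
      | c :: rest =>
          have hallp : ∀ x ∈ rest.takeWhile (· = c), x = c := by
            intro x hx
            simpa using List.mem_takeWhile_imp hx
          have hdw : ∀ d q, rest.dropWhile (· = c) = d :: q → ¬ (d = c) := by
            intro d q h
            have := dropWhile_head_false (fun x => decide (x = c)) rest d q h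
            simpa using this
          have hql : (rest.dropWhile (· = c)).length ≤ n := by
            have h1 := List.length_dropWhile_le (fun x => decide (x = c)) rest
            simp at hl; omega
          have hdecomp : c :: rest
              = (c :: rest.takeWhile (· = c)) ++ rest.dropWhile (· = c) := by
            simp [List.takeWhile_append_dropWhile]
          have hst := starts_block aa c (rest.takeWhile (· = c)) (rest.dropWhile (· = c)) hallp hdw
          have hen := ends_block aa c (rest.takeWhile (· = c)) (rest.dropWhile (· = c)) hallp hdw
          have hruns : pvRuns (c :: rest)
              = (c, ((rest.takeWhile (· = c)).length : Int) + 1)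
                  :: pvRuns (rest.dropWhile (· = c)) := by
            rw [pvRuns]
          have hihv := ih (rest.dropWhile (· = c)) hql
          set tw := rest.takeWhile (· = c) with htwdef
          set dw := rest.dropWhile (· = c) with hdwdef
          have hmapcollapse :
              ((((pvStarts dw aa).map (fun j => tw.length + 1 + j)).zip
                  ((pvEnds dw aa).map (fun j => tw.length + 1 + j))).map
                    (fun p => ((p.2 : Int) - (p.1 : Int))))
              = (((pvStarts dw aa).zip (pvEnds dw aa)).map
                    (fun p => ((p.2 : Int) - (p.1 : Int)))) := by
            rw [List.zip_map, List.map_map]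
            apply List.map_congr_left
            intro p _
            cases p with
            | mk s e =>
                simp only [Function.comp_apply, Prod.map_apply]
                push_cast
                ring
          by_cases hc : [c] = aa.toList
          · -- matching block: one run of length tw.length + 1, then the tail
            have hzip : ((pvStarts (c :: rest) aa).zip (pvEnds (c :: rest) aa))
                = (0, tw.length + 1) ::
                    (((pvStarts dw aa).map (fun j => tw.length + 1 + j)).zip
                      ((pvEnds dw aa).map (fun j => tw.length + 1 + j))) := by
              rw [hdecomp, hst, hen]
              simp [hc]
            unfold pvBVal
            rw [hzip]
            rw [List.map_cons]
            have hd0 : (((tw.length + 1 : Nat) : Int) - ((0 : Nat) : Int))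
                = (tw.length : Int) + 1 := by push_cast; ring
            rw [List.filter_cons]
            rw [hmapcollapse]
            unfold pvBSum
            rw [hruns]
            rw [List.filter_cons]
            by_cases hmle : m ≤ (tw.length : Int) + 1
            · rw [if_pos (by simp [hmle]), if_pos (by simp [hc, hmle])]
              simp only [List.map_cons, List.sum_cons]
              rw [hd0]
              have := hihv
              unfold pvBVal pvBSum at this
              rw [this]
            · rw [if_neg (by simp [hmle]), if_neg (by simp [hc, hmle])]
              have := hihv
              unfold pvBVal pvBSum at this
              rw [this]
          · -- non-matching block: it disappears on both sides
            have hzip : ((pvStarts (c :: rest) aa).zip (pvEnds (c :: rest) aa))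
                = (((pvStarts dw aa).map (fun j => tw.length + 1 + j)).zip
                      ((pvEnds dw aa).map (fun j => tw.length + 1 + j))) := by
              rw [hdecomp, hst, hen]
              simp [hc]
            unfold pvBVal
            rw [hzip, hmapcollapse]
            unfold pvBSum
            rw [hruns, List.filter_cons]
            rw [if_neg (by simp [hc])]
            have := hihv
            unfold pvBVal pvBSum at this
            rw [this]

-- ===== VERDICT (by name: the statement is the Claim_ definition above) =====
theorem cumulative_patch_length_spec : Claim_equal_cumulative_patch_length := by
  intro seq aa min_len _
  show _ = _
  have h := main_inv aa min_len seq.toList.length seq.toList (le_refl _) 0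
  have hb := bval_eq_bsum aa min_len seq.toList.length seq.toList (le_refl _)
  simp only [cumulative_patch_length, cumulative_patch_length_alt] at *
  rw [← hb] at h
  simpa [pvBVal] using h
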